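-- pv_equiv track=rewrite | github.com/likegyu/bitcoin-trading-manager | macro_history.py | _recent_unique
-- ===== SOURCE A (Python) =====
-- def _recent_unique(events: list[str], limit: int = 3) -> list[str]:
--     result: list[str] = []
--     seen: set[str] = set()
--     for event in reversed(events):
--         if not event or event in seen:
--             continue
--         result.append(event)
--         seen.add(event)
--         if len(result) >= limit:
--             break
--     return list(reversed(result))
-- ===== SOURCE B (Python) =====
-- def _recent_unique(events: list[str], limit: int = 3) -> list[str]:
--     if limit <= 0:
--         return []
--     last: dict[str, None] = {}
--     for event in events:
--         if event:
--             last.pop(event, None)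
--             last[event] = None
--     order = list(last)
--     return order[-limit:]
-- ===== Notes on version B (the rewrite author's own statement) =====
-- stated objective: alternative
-- what changed: Replaces A's reversed scan with a seen-set and early break by a forward pass over a dict used as a move-to-end structure (pop then re-insert, so keys end up ordered by last occurrence) followed by a single slice order[-limit:], returning [] when limit <= 0.
-- intended difference: When limit <= 0 and events contains a non-empty event, A still returns one element (its break test fires only after the first append), while B returns an empty list, the intended value when at most zero events are requested. — e.g. on _recent_unique(["a"], 0): A returns ["a"], B returns []
import Mathlib
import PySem

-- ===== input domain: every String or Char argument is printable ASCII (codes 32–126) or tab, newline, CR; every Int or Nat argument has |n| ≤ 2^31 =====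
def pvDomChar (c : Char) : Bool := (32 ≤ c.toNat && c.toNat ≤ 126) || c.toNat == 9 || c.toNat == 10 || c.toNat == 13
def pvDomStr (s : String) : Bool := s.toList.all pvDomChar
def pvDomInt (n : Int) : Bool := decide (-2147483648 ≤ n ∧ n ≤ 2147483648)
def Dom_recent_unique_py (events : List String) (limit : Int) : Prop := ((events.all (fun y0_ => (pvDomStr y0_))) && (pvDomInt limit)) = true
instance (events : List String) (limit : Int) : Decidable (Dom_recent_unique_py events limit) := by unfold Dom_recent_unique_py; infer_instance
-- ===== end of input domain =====

-- B replaces A's backward scan with an early break by a forward move-to-end pass plus a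
-- final slice order[-limit:] ([] when limit <= 0) — an alternative decomposition, not claimed faster.

-- ===== PORT A =====
-- loop 'for event in reversed(events)' with result/seen state and the break on len(result) >= limit
def recAuxA (limit : Int) : List String → List String → PySem.Set String → List String
  | [], result, _ => result
  | event :: rest, result, seen =>
    if event = "" ∨ event ∈ seen then recAuxA limit rest result seen
    else
      let result' := result ++ [event]
      let seen' := PySem.Set.add seen event
      if limit ≤ (result'.length : Int) then result'
      else recAuxA limit rest result' seen'

def recent_unique_py (events : List String) (limit : Int) : List String :=
  (recAuxA limit events.reverse [] PySem.Set.empty).reverse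

-- ===== PORT B =====
-- forward pass: dict as move-to-end (pop then re-insert), keys ordered by last occurrence
def mteDictAux : List String → PySem.Dict String Unit → PySem.Dict String Unit
  | [], d => d
  | event :: rest, d =>
    if event = "" then mteDictAux rest d
    else mteDictAux rest (PySem.Dict.insert (PySem.Dict.erase d event) event ())

def recent_unique_py_alt (events : List String) (limit : Int) : List String :=
  if limit ≤ 0 then []
  else
    let order := (mteDictAux events PySem.Dict.empty).keys
    PySem.List.slice order (some (-limit)) none

-- ===== PRECONDITION & SPEC =====
-- When limit <= 0 and events contains a non-empty event, A still returns one element (its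
-- break test fires only after the first append), while B returns an empty list, the intended value
-- when at most zero events are requested.
def D_recent_unique_py (events : List String) (limit : Int) : Prop :=
  limit ≤ 0 ∧ ∃ e ∈ events, e ≠ ""
instance (events : List String) (limit : Int) : Decidable (D_recent_unique_py events limit) := by
  unfold D_recent_unique_py; infer_instance

def Spec_recent_unique_py (events : List String) (limit : Int) (out : List String) : Prop :=
  ¬ D_recent_unique_py events limit → out = recent_unique_py_alt events limit
instance (events : List String) (limit : Int) (out : List String) : Decidable (Spec_recent_unique_py events limit out) := by
  unfold Spec_recent_unique_py; infer_instance

def pvDiffWitness_recent_unique_py : List String × Int := (["a"], 0)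
def pvDiffWitnessOut_recent_unique_py : (List String) × (List String) := (["a"], [])

-- ===== CLAIM (what is proved, stated in full; the proofs are below) =====
def Claim_unchanged_recent_unique_py : Prop := ∀ (events : List String) (limit : Int), Dom_recent_unique_py events limit → Spec_recent_unique_py events limit (recent_unique_py events limit)
def Claim_changed_recent_unique_py : Prop := Dom_recent_unique_py (pvDiffWitness_recent_unique_py.1) (pvDiffWitness_recent_unique_py.2) ∧ D_recent_unique_py (pvDiffWitness_recent_unique_py.1) (pvDiffWitness_recent_unique_py.2) ∧ recent_unique_py (pvDiffWitness_recent_unique_py.1) (pvDiffWitness_recent_unique_py.2) = pvDiffWitnessOut_recent_unique_py.1 ∧ recent_unique_py_alt (pvDiffWitness_recent_unique_py.1) (pvDiffWitness_recent_unique_py.2) = pvDiffWitnessOut_recent_unique_py.2 ∧ pvDiffWitnessOut_recent_unique_py.1 ≠ pvDiffWitnessOut_recent_unique_py.2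
def Claim_exact_recent_unique_py : Prop := ∀ (events : List String) (limit : Int), Dom_recent_unique_py events limit → D_recent_unique_py events limit → recent_unique_py events limit ≠ recent_unique_py_alt events limit

-- ===== LEMMAS AND PROOFS =====

-- proof-side view of B's dict loop as a move-to-end list of keys
def mteAux : List String → List String → List String
  | [], order => order
  | event :: rest, order =>
    if event = "" then mteAux rest order
    else
      let order' := if event ∈ order then order.erase event else order
      mteAux rest (order' ++ [event])

theorem mteDictAux_keys : ∀ (l : List String) (d : PySem.Dict String Unit), d.keys.Nodup →
    (mteDictAux l d).keys = mteAux l d.keys := by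
  intro l
  induction l with
  | nil => intro d _; rfl
  | cons e rest ih =>
    intro d hnd
    by_cases he : e = ""
    · simp [mteDictAux, mteAux, he, ih d hnd]
    · have hkeys : (PySem.Dict.insert (PySem.Dict.erase d e) e ()).keys
          = d.keys.filter (fun x => !(x == e)) ++ [e] := by
        have hnc : (PySem.Dict.erase d e).contains e = false := by
          simp [PySem.Dict.erase, PySem.Dict.contains, List.any_filter]
        simp only [PySem.Dict.insert, hnc]
        simp only [PySem.Dict.erase, PySem.Dict.keys, Bool.false_eq_true, if_false,
          List.map_append, List.map_cons, List.map_nil]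
        rw [List.filter_map]
        rfl
      have hfilter : d.keys.filter (fun x => !(x == e))
          = if e ∈ d.keys then d.keys.erase e else d.keys := by
        by_cases hm : e ∈ d.keys
        · rw [if_pos hm, List.Nodup.erase_eq_filter hnd]
          simp [bne]
        · rw [if_neg hm, List.filter_eq_self]
          intro a ha
          have : ¬ a = e := fun hEq => hm (hEq ▸ ha)
          simp [this]
      have hnd' : (d.keys.filter (fun x => !(x == e)) ++ [e]).Nodup := by
        rw [List.nodup_append]
        refine ⟨hnd.filter _, by simp, ?_⟩
        intro a ha b hb
        have hbe : b = e := by simpa using hb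
        subst hbe
        have := List.of_mem_filter ha
        simp only [Bool.not_eq_eq_eq_not] at this
        intro hEq
        rw [hEq] at this
        simp at this
      simp only [mteDictAux, mteAux, if_neg he]
      rw [ih _ (by rw [hkeys]; exact hnd'), hkeys, hfilter]

-- keep-first dedup of the non-empty elements, with an explicit seen list
def gDedup : List String → List String → List String
  | [], _ => []
  | e :: rest, seen => if e = "" ∨ e ∈ seen then gDedup rest seen else e :: gDedup rest (seen ++ [e])

-- A's truncation: take elements until the remaining budget k drops to ≤ 1 (always at least one)
def takeCap : Int → List String → List String
  | _, [] => []
  | k, x :: xs => if k ≤ 1 then [x] else x :: takeCap (k-1) xs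

theorem takeCap_eq (k : Int) (xs : List String) : takeCap k xs = xs.take (max k 1).toNat := by
  induction xs generalizing k with
  | nil => simp [takeCap]
  | cons x xs ih =>
    by_cases h : k ≤ 1
    · have : (max k 1).toNat = 1 := by omega
      simp [takeCap, h]
    · have h2 : (max k 1).toNat = (max (k-1) 1).toNat + 1 := by omega
      simp [takeCap, h, h2, List.take_succ_cons, ih]

theorem recAuxA_eq (limit : Int) (l : List String) :
    ∀ (result seen : List String),
      recAuxA limit l result seen = result ++ takeCap (limit - result.length) (gDedup l seen) := by
  induction l with
  | nil => intro result seen; simp [recAuxA, gDedup, takeCap]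
  | cons e rest ih =>
    intro result seen
    by_cases hskip : e = "" ∨ e ∈ seen
    · simp [recAuxA, gDedup, hskip, ih]
    · have hnm : e ∉ seen := fun h => hskip (Or.inr h)
      have hadd : PySem.Set.add seen e = seen ++ [e] := by
        simp [PySem.Set.add, PySem.Set.contains, hnm]
      by_cases hbrk : limit - result.length ≤ 1
      · simp [recAuxA, gDedup, hskip, takeCap, hbrk]
        intro h
        exact absurd hbrk (by omega)
      · simp [recAuxA, gDedup, hskip, takeCap, hbrk, hadd, ih]
        rw [if_neg (show ¬ limit ≤ (result.length : Int) + 1 by omega)]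
        have hlen : limit - ((result.length : Int) + 1) = limit - result.length - 1 := by omega
        rw [hlen]

-- dropping a later duplicate (or an empty string) does not change gDedup
theorem gDedup_dup (e : String) (vs : List String) :
    ∀ (us seen : List String), (e = "" ∨ e ∈ seen ∨ e ∈ us) →
      gDedup (us ++ e :: vs) seen = gDedup (us ++ vs) seen := by
  intro us
  induction us with
  | nil =>
    intro seen h
    have : e = "" ∨ e ∈ seen := by simpa using h
    simp [gDedup, this]
  | cons u us ih =>
    intro seen h
    by_cases hskip : u = "" ∨ u ∈ seen
    · have h' : e = "" ∨ e ∈ seen ∨ e ∈ us := by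
        rcases h with h | h | h
        · exact Or.inl h
        · exact Or.inr (Or.inl h)
        · rcases List.mem_cons.mp h with rfl | h
          · rcases hskip with rfl | hu
            · exact Or.inl rfl
            · exact Or.inr (Or.inl hu)
          · exact Or.inr (Or.inr h)
      simp [gDedup, hskip, ih _ h']
    · have h' : e = "" ∨ e ∈ seen ++ [u] ∨ e ∈ us := by
        rcases h with h | h | h
        · exact Or.inl h
        · exact Or.inr (Or.inl (by simp [h]))
        · rcases List.mem_cons.mp h with rfl | h
          · exact Or.inr (Or.inl (by simp))
          · exact Or.inr (Or.inr h)
      simp [gDedup, hskip, ih _ h']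

-- nodup, no-empty, seen-disjoint lists are fixed by gDedup
theorem gDedup_fixed : ∀ (xs seen : List String), xs.Nodup → "" ∉ xs →
    (∀ x ∈ xs, x ∉ seen) → gDedup xs seen = xs := by
  intro xs
  induction xs with
  | nil => intro seen _ _ _; rfl
  | cons x xs ih =>
    intro seen hnd hne hdis
    have hx : ¬ (x = "" ∨ x ∈ seen) := by
      rintro (rfl | h)
      · exact hne (by simp)
      · exact hdis x (by simp) h
    have hrec := ih (seen ++ [x]) hnd.of_cons (fun h => hne (List.mem_cons_of_mem _ h))
      (by
        intro y hy hmem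
        rcases List.mem_append.mp hmem with h | h
        · exact hdis y (List.mem_cons_of_mem _ hy) h
        · have : y = x := by simpa using h
          exact (List.nodup_cons.mp hnd).1 (this ▸ hy))
    simp [gDedup, hx, hrec]

theorem mteAux_reverse : ∀ (l order : List String), order.Nodup → "" ∉ order →
    (mteAux l order).reverse = gDedup ((order ++ l).reverse) [] := by
  intro l
  induction l with
  | nil =>
    intro order hnd hne
    have := gDedup_fixed order.reverse [] (by simpa using hnd)
      (by simpa using hne) (by simp)
    simp [mteAux, this]
  | cons e rest ih =>
    intro order hnd hne
    by_cases he : e = ""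
    · subst he
      have hdup := gDedup_dup "" order.reverse rest.reverse [] (Or.inl rfl)
      show (mteAux rest order).reverse = _
      rw [ih order hnd hne]
      simp only [List.reverse_append, List.reverse_cons, List.append_assoc] at hdup ⊢
      simpa using hdup.symm
    · by_cases hmem : e ∈ order
      · obtain ⟨as, bs, rfl⟩ := List.append_of_mem hmem
        have hsplit := List.nodup_append.mp hnd
        have heas : e ∉ as := fun h => hsplit.2.2 e h e (by simp) rfl
        have hebs : e ∉ bs := (List.nodup_cons.mp hsplit.2.1).1
        have herase : (as ++ e :: bs).erase e = as ++ bs := by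
          rw [List.erase_append_right _ heas, List.erase_cons_head]
        have hnd' : (as ++ bs ++ [e]).Nodup := by
          have h1 : as.Nodup := hsplit.1
          have h2 : bs.Nodup := (List.nodup_cons.mp hsplit.2.1).2
          have hdisj := hsplit.2.2
          rw [List.nodup_append, List.nodup_append]
          refine ⟨⟨h1, h2, ?_⟩, by simp, ?_⟩
          · intro a ha b hb; exact hdisj a ha b (by simp [hb])
          · intro a ha b hb
            have hbe : b = e := by simpa using hb
            subst hbe
            rcases List.mem_append.mp ha with h | h
            · exact fun hEq => heas (hEq ▸ h)
            · exact fun hEq => hebs (hEq ▸ h)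
        have hne' : "" ∉ as ++ bs ++ [e] := by
          intro h
          rcases List.mem_append.mp h with h | h
          · rcases List.mem_append.mp h with h | h
            · exact hne (by simp [h])
            · exact hne (by simp [h])
          · have hEq : "" = e := by simpa using h
            exact he hEq.symm
        have hrec := ih (as ++ bs ++ [e]) hnd' hne'
        have hdup := gDedup_dup e as.reverse (rest.reverse ++ e :: bs.reverse) []
          (Or.inr (Or.inr (by simp)))
        simp only [mteAux, if_neg he, if_pos hmem, herase] at *
        rw [hrec]
        simp only [List.reverse_append, List.reverse_cons] at *
        simp only [List.append_assoc] at *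
        simpa using hdup.symm
      · have hnd' : (order ++ [e]).Nodup := by
          rw [List.nodup_append]
          refine ⟨hnd, by simp, ?_⟩
          intro a ha b hb
          have hbe : b = e := by simpa using hb
          subst hbe
          exact fun hEq => hmem (hEq ▸ ha)
        have hne' : "" ∉ order ++ [e] := by
          intro h
          rcases List.mem_append.mp h with h | h
          · exact hne h
          · have hEq : "" = e := by simpa using h
            exact he hEq.symm
        have hrec := ih (order ++ [e]) hnd' hne'
        simp only [mteAux, if_neg he, if_neg hmem]
        rw [hrec]
        simp [List.reverse_append, List.append_assoc]

theorem reverse_take_eq (O : List String) (m : Nat) :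
    (O.reverse.take m).reverse = O.drop (O.length - m) := by
  rw [List.take_reverse]
  simp

-- if gDedup returns [], every input element was skipped (empty or already seen)
theorem gDedup_nil : ∀ (xs seen : List String), gDedup xs seen = [] →
    ∀ x ∈ xs, x = "" ∨ x ∈ seen := by
  intro xs
  induction xs with
  | nil => intro seen _ x hx; cases hx
  | cons e rest ih =>
    intro seen h x hx
    by_cases hskip : e = "" ∨ e ∈ seen
    · rw [gDedup, if_pos hskip] at h
      rcases List.mem_cons.mp hx with rfl | hx
      · exact hskip
      · exact ih seen h x hx
    · rw [gDedup, if_neg hskip] at h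
      cases h

-- gDedup of a list of empty strings is empty
theorem gDedup_all_empty : ∀ (xs seen : List String), (∀ e ∈ xs, e = "") →
    gDedup xs seen = [] := by
  intro xs
  induction xs with
  | nil => intro seen _; rfl
  | cons x rest ih =>
    intro seen hall
    have hx : x = "" := hall x (by simp)
    rw [gDedup, if_pos (Or.inl hx)]
    exact ih seen (fun e he => hall e (List.mem_cons_of_mem _ he))

-- A's result as takeCap over the keep-first dedup of the reversed events
theorem recent_unique_py_eq (events : List String) (limit : Int) :
    recent_unique_py events limit = (takeCap limit (gDedup events.reverse [])).reverse := by
  unfold recent_unique_py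
  have h := recAuxA_eq limit events.reverse [] []
  simp only [List.length_nil, Nat.cast_zero, sub_zero, List.nil_append] at h
  rw [show (PySem.Set.empty : PySem.Set String) = ([] : List String) from rfl, h]

-- B's key list, reversed, is the same keep-first dedup
theorem alt_keys_eq (events : List String) :
    (mteDictAux events PySem.Dict.empty).keys.reverse = gDedup events.reverse [] := by
  rw [mteDictAux_keys events PySem.Dict.empty (by simp [PySem.Dict.empty, PySem.Dict.keys])]
  have : (PySem.Dict.empty : PySem.Dict String Unit).keys = [] := by
    simp [PySem.Dict.empty, PySem.Dict.keys]
  rw [this]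
  simpa using mteAux_reverse events [] (by simp) (by simp)

-- ===== VERDICT (by name: the statement is the Claim_ definition above) =====
theorem recent_unique_py_spec : Claim_unchanged_recent_unique_py := by
  intro events limit _
  intro hnD
  unfold recent_unique_py_alt
  by_cases hpos : limit ≤ 0
  · have hall : ∀ e ∈ events, e = "" := by
      intro e he
      by_contra hne
      exact hnD ⟨hpos, e, he, hne⟩
    have hded : gDedup events.reverse [] = [] :=
      gDedup_all_empty events.reverse [] (fun e he => hall e (by simpa using he))
    rw [recent_unique_py_eq, hded]
    simp [takeCap, hpos]
  · rw [recent_unique_py_eq, takeCap_eq, if_neg hpos]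
    have hcap : 0 < limit.toNat := by omega
    have hcast : (limit.toNat : Int) = limit := by omega
    have hmax : max limit 1 = limit := by omega
    rw [hmax, ← hcast, PySem.List.slice_from_neg_natCast _ _ hcap, ← alt_keys_eq, reverse_take_eq, Int.toNat_natCast]

theorem recent_unique_py_changed : Claim_changed_recent_unique_py := by
  unfold Claim_changed_recent_unique_py; decide

theorem recent_unique_py_tight : Claim_exact_recent_unique_py := by
  intro events limit _ hD
  obtain ⟨hle, e, he, hne⟩ := hD
  unfold recent_unique_py_alt
  rw [if_pos hle, recent_unique_py_eq]
  have hded : gDedup events.reverse [] ≠ [] := by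
    intro h
    have := gDedup_nil events.reverse [] h e (by simpa using he)
    simpa [hne] using this
  cases hd : gDedup events.reverse [] with
  | nil => exact absurd hd hded
  | cons x xs =>
    simp [takeCap, show limit ≤ 1 by omega]
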